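-- pv_equiv track=rewrite | github.com/Benjamin-van-Heerden/Python | google_foobar/level5/try_again_five.py | partitions_and_ways
-- ===== SOURCE A (Python) =====
-- def factorial(i, f_table):
--     """
--     read the factorial from the precomputed table
--
--     :param i: positive integer
--     :param f_table: previously computed factorial table
--     :return: the factorial of i
--     """
--     return f_table[i - 1]
--
-- def find_partition_ways(p, n, f_table):
--     """
--     this function computes the number:
--         n!/(1^{i_1}i_1!2^{i_2}i_2!...n^{i_n}i_n!)
--     where p is an integer partition of n that has i_1 1s, i_2 2s, ..., and i_n ns.
--     this number is described in https://franklinvp.github.io/2020-06-05-PolyaFooBar/.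
--     it is a measure of how many ways the partition can be made up with given parameters
--
--     :param p: integer partition as a list
--     :param n: integer
--     :param f_table: previously computed factorial table
--     :return: the described number
--     """
--     counts = {}
--     for counter in p:
--         if counter in counts:
--             counts[counter] += 1
--         else:
--             counts[counter] = 1
--     result = factorial(n, f_table)
--     for color, frequency in counts.items():
--         result //= (color ** frequency) * factorial(frequency, f_table)
--     return result
--
-- def partitions_and_ways(total_nodes, f_table):
--     """
--     iterative algorithm to compute all the integer partitions of a given number as well as the "ways" they may
--     be formed from the function find_partition_ways(p, n, f_table). the algorithm itself can be found in this paper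
--     https://arxiv.org/pdf/0909.2331.pdf, as discussed in the docstring of solution(w, h, s).
--
--     :param total_nodes: integer
--     :param f_table: previously computed factorial table
--     :return: a list of tuples of the partitions and their "ways"
--     """
--     k = 0  # index of last element in a partition
--     p = total_nodes * [0]  # to store a partition in p[0:k+1]
--     p[0] = total_nodes  # first partition is [n]
--
--     # the loop stops when the current partition has all 1s
--     temp_all_partitions = [0 for i in range(total_nodes + 1)]
--     k = 1
--     y = total_nodes - 1
--     result = []  # to store all the partitions
--     while k != 0:
--         x = temp_all_partitions[k - 1] + 1
--         k -= 1
--         while 2 * x <= y: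
--             temp_all_partitions[k] = x
--             y -= x
--             k += 1
--         while x <= y:
--             temp_all_partitions[k] = x
--             temp_all_partitions[k + 1] = y
--             partition = temp_all_partitions[:k + 2]
--             result.append((partition, find_partition_ways(partition, total_nodes, f_table)))
--             x += 1
--             y -= 1
--         temp_all_partitions[k] = x + y
--         y = x + y - 1
--         partition = temp_all_partitions[:k + 1]
--         result.append((partition, find_partition_ways(partition, total_nodes, f_table)))
--     return result
-- ===== SOURCE B (Python) =====
-- def factorial(i, f_table):
--     return f_table[i - 1]
--
--
-- def find_partition_ways(p, n, f_table):
--     counts = {}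
--     for counter in p:
--         if counter in counts:
--             counts[counter] += 1
--         else:
--             counts[counter] = 1
--     result = factorial(n, f_table)
--     for color, frequency in counts.items():
--         result //= (color ** frequency) * factorial(frequency, f_table)
--     return result
--
--
-- def partitions_and_ways(total_nodes, f_table):
--     if total_nodes < 1:
--         raise IndexError("total_nodes must be a positive integer")
--
--     def asc(n, m):
--         # all partitions of n into non-decreasing parts >= m, lexicographic order
--         if n == 0:
--             return [[]]
--         out = []
--         for i in range(m, n + 1):
--             for tail in asc(n - i, i):
--                 out.append([i] + tail)
--         return out
--     return [(p, find_partition_ways(p, total_nodes, f_table))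
--             for p in asc(total_nodes, 1)]
-- ===== Notes on version B (the rewrite author's own statement) =====
-- stated objective: alternative
-- what changed: Replaces the iterative accelAsc stack-array while-loop with a recursive ascending-partition generator asc(n, m) that prefixes each i in [m, n] onto the partitions of n-i with parts >= i, then maps find_partition_ways over the generated list.
import Mathlib
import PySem

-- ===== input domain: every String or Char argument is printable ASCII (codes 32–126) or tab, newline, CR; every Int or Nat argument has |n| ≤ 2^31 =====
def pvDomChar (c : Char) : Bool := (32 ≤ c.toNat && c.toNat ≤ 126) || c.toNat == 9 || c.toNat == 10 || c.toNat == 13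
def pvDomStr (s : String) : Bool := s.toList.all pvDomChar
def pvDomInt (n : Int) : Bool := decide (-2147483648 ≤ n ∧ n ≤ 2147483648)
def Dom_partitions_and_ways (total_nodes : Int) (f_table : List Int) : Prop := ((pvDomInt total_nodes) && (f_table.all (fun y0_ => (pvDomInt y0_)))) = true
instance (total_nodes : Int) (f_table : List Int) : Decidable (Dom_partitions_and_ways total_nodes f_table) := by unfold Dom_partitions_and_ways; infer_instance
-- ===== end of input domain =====

-- B re-implements the accelAsc while-loop of A as a recursive ascending-partition
-- generator of the same cost ("alternative", not faster); return values are proved equal on Pre_.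

-- ===== PORT A =====

-- f_table[i - 1]; IndexError (none) is impossible under Pre_ (1 ≤ i ≤ len f_table at every call)
def factorial (i : Int) (f_table : List Int) : Int :=
  (PySem.List.pyGet? f_table (i - 1)).getD 0

-- counts = {} ; for counter in p: …  then result //= (color ** frequency) * factorial(frequency, f_table).
-- frequency ≥ 1 always, so 'color ** frequency' is exactly 'color ^ frequency.toNat'.
def find_partition_ways (p : List Int) (n : Int) (f_table : List Int) : Int :=
  let counts : PySem.Dict Int Int :=
    p.foldl (fun d counter =>
      if d.contains counter then d.insert counter (d.getD counter 0 + 1)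
      else d.insert counter 1) PySem.Dict.empty
  counts.items.foldl
    (fun result cf => PySem.Int.floordiv result (cf.1 ^ cf.2.toNat * factorial cf.2 f_table))
    (factorial n f_table)

-- inner loop 'while 2 * x <= y: temp[k] = x; y -= x; k += 1' (fuel is a pure totality guard;
-- the call below passes y.toNat + 1, proved sufficient since y decreases by x ≥ 1 each pass)
def pwPhase1 (fuel : Nat) (a : List Int) (k : Nat) (x y : Int) : List Int × Nat × Int :=
  match fuel with
  | 0 => (a, k, y)
  | f + 1 =>
    if 2 * x ≤ y then pwPhase1 f (a.set k x) (k + 1) x (y - x) else (a, k, y)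

-- inner loop 'while x <= y: temp[k] = x; temp[k+1] = y; partition = temp[:k+2]; append; x += 1; y -= 1'
def pwPhase2 (n : Int) (ft : List Int) (fuel : Nat) (a : List Int) (k : Nat) (x y : Int)
    (res : List (List Int × Int)) : List Int × Int × Int × List (List Int × Int) :=
  match fuel with
  | 0 => (a, x, y, res)
  | f + 1 =>
    if x ≤ y then
      let a' := (a.set k x).set (k + 1) y
      let part := a'.take (k + 2)
      pwPhase2 n ft f a' k (x + 1) (y - 1) (res ++ [(part, find_partition_ways part n ft)])
    else (a, x, y, res)

-- outer loop 'while k != 0: x = temp[k-1] + 1; k -= 1; …' (k ≥ 1 inside, so temp[k-1] is a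
-- nonnegative in-range index and k - 1 on Nat is exact)
def pwOuter (n : Int) (ft : List Int) (fuel : Nat) (a : List Int) (k : Nat) (y : Int)
    (res : List (List Int × Int)) : List (List Int × Int) :=
  match fuel with
  | 0 => res
  | f + 1 =>
    if k ≠ 0 then
      let x := a.getD (k - 1) 0 + 1
      let r1 := pwPhase1 (y.toNat + 1) a (k - 1) x y
      let r2 := pwPhase2 n ft (r1.2.2.toNat + 1) r1.1 r1.2.1 x r1.2.2 res
      let a3 := r2.1.set r1.2.1 (r2.2.1 + r2.2.2.1)
      let part := a3.take (r1.2.1 + 1)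
      pwOuter n ft f a3 r1.2.1 (r2.2.1 + r2.2.2.1 - 1)
        (r2.2.2.2 ++ [(part, find_partition_ways part n ft)])
    else res

-- p = total_nodes * [0]; p[0] = total_nodes: p is never read again (dead store); the assignment
-- raises IndexError exactly when total_nodes ≤ 0, which Pre_ excludes.
-- temp_all_partitions = [0 for i in range(total_nodes + 1)]; the outer-loop fuel 2^(n.toNat+1)
-- is a totality guard proved sufficient below (the loop runs once per emitted partition).
def partitions_and_ways (total_nodes : Int) (f_table : List Int) : List (List Int × Int) :=
  let a := List.replicate (total_nodes + 1).toNat 0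
  pwOuter total_nodes f_table (2 ^ (total_nodes.toNat + 1)) a 1 (total_nodes - 1) []

-- ===== PORT B =====

-- def asc(n, m): if n == 0: return [[]]; out = []; for i in range(m, n+1): for tail in asc(n-i, i): out.append([i]+tail)
-- (fuel is a totality guard; the top call passes total_nodes.toNat + 1, sufficient since every
-- recursive call strictly decreases n and is only reached with i ≥ m ≥ 1)
def ascB (fuel : Nat) (n m : Int) : List (List Int) :=
  match fuel with
  | 0 => []
  | f + 1 =>
    if n = 0 then [[]]
    else (PySem.List.pyRange m (n + 1) 1).foldl
      (fun out i => out ++ (ascB f (n - i) i).map (fun tail => i :: tail)) []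

-- 'if total_nodes < 1: raise IndexError' — outside Pre_; the port returns [] there (never compared)
def partitions_and_ways_alt (total_nodes : Int) (f_table : List Int) : List (List Int × Int) :=
  if total_nodes < 1 then []
  else
    (ascB (total_nodes.toNat + 1) total_nodes 1).map
      (fun p => (p, find_partition_ways p total_nodes f_table))

-- ===== PRECONDITION & SPEC =====

-- Pre_ excludes exactly the inputs where A raises: total_nodes < 1 (IndexError on p[0] =
-- total_nodes), f_table shorter than total_nodes (IndexError in factorial(total_nodes)), and a
-- zero f_table entry at an index i whose multiplicity i+1 occurs in some partition of
-- total_nodes (ZeroDivisionError); multiplicity i+1 = total_nodes - 1 occurs in no partition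
-- when total_nodes ≥ 3, so a zero at index total_nodes - 2 is harmless and stays inside Pre_.
def Pre_partitions_and_ways (total_nodes : Int) (f_table : List Int) : Prop :=
  1 ≤ total_nodes ∧ total_nodes ≤ (f_table.length : Int) ∧
    ∀ i : Nat, i < total_nodes.toNat →
      (3 ≤ total_nodes ∧ i = total_nodes.toNat - 2) ∨ f_table.getD i 1 ≠ 0
instance (total_nodes : Int) (f_table : List Int) : Decidable (Pre_partitions_and_ways total_nodes f_table) := by
  unfold Pre_partitions_and_ways; infer_instance

def pvWitness_partitions_and_ways : Int × List Int := (3, [1, 2, 6])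

def Spec_partitions_and_ways (total_nodes : Int) (f_table : List Int) (out : List (List Int × Int)) : Prop := out = partitions_and_ways_alt total_nodes f_table
instance (total_nodes : Int) (f_table : List Int) (out : List (List Int × Int)) : Decidable (Spec_partitions_and_ways total_nodes f_table out) := by unfold Spec_partitions_and_ways; infer_instance

-- ===== CLAIM (what is proved, stated in full; the proofs are below) =====
def Claim_equal_partitions_and_ways : Prop := ∀ (total_nodes : Int) (f_table : List Int), Dom_partitions_and_ways total_nodes f_table → Pre_partitions_and_ways total_nodes f_table → Spec_partitions_and_ways total_nodes f_table (partitions_and_ways total_nodes f_table)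


-- ===== LEMMAS AND PROOFS =====

-- ascB with the canonical sufficient fuel (proof-side abbreviation)
def ascI (n m : Int) : List (List Int) := ascB (n.toNat + 1) n m

-- the two-part tail emitted by A's second inner while-loop: [[x,y],[x+1,y-1],…] while x ≤ y
def twoPart (x y : Int) : List (List Int) :=
  if x ≤ y then [x, y] :: twoPart (x + 1) (y - 1) else []
termination_by (y + 1 - x).toNat
decreasing_by omega

-- everything A's outer loop will still emit from a loop head whose stack (top first) is the
-- first argument and whose 'y' is the second
def specHead : List Int → Int → List (List Int)
  | [], _ => []
  | a :: rest, y =>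
      ((ascI (a + 1 + y) (a + 1)).map (fun q => rest.reverse ++ q)) ++ specHead rest (a + y)

lemma flatMap_congr_mem {α β : Type} (l : List α) (f g : α → List β)
    (h : ∀ x ∈ l, f x = g x) : l.flatMap f = l.flatMap g := by
  induction l with
  | nil => rfl
  | cons a t ih =>
      simp only [List.flatMap_cons]
      rw [h a (by simp), ih (fun x hx => h x (by simp [hx]))]

lemma ascB_flatMap (f : Nat) (n m : Int) (hn : n ≠ 0) :
    ascB (f + 1) n m = (PySem.List.pyRange m (n + 1) 1).flatMap
      (fun i => (ascB f (n - i) i).map (fun tail => i :: tail)) := by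
  simp only [ascB, if_neg hn]
  rw [PySem.List.foldl_append_eq_flatMap]
  simp

lemma ascB_split (f : Nat) (n m : Int) (hn : n ≠ 0) (hmn : m ≤ n) :
    ascB (f + 1) n m = (ascB f (n - m) m).map (fun t => m :: t) ++ ascB (f + 1) n (m + 1) := by
  rw [ascB_flatMap f n m hn, ascB_flatMap f n (m+1) hn,
    PySem.List.pyRange_one_cons (by omega : m < n + 1)]
  simp [List.flatMap_cons]

lemma ascB_nil_of_lt (f : Nat) (n m : Int) (h0 : n ≠ 0) (h : n < m) : ascB f n m = [] := by
  cases f with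
  | zero => rfl
  | succ f =>
      simp only [ascB, if_neg h0]
      rw [PySem.List.pyRange_one_eq_nil (by omega : n + 1 ≤ m)]
      rfl

lemma ascB_irrel (f : Nat) : ∀ (f' : Nat) (n m : Int), 1 ≤ m → 0 ≤ n →
    n.toNat < f → n.toNat < f' → ascB f n m = ascB f' n m := by
  induction f with
  | zero => intro f' n m _ hn h _; omega
  | succ f ih =>
      intro f' n m hm hn h h'
      cases f' with
      | zero => omega
      | succ f' =>
          by_cases h0 : n = 0
          · subst h0; simp [ascB]
          · rw [ascB_flatMap f n m h0, ascB_flatMap f' n m h0]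
            apply flatMap_congr_mem
            intro i hi
            rw [PySem.List.mem_pyRange_one] at hi
            have h1 : 1 ≤ i := le_trans hm hi.1
            have h2 : (n - i).toNat < f := by omega
            have h2' : (n - i).toNat < f' := by omega
            rw [ih f' (n - i) i h1 (by omega) h2 h2']

lemma ascI_step (n m : Int) (hm : 1 ≤ m) (hmn : m ≤ n) :
    ascI n m = (ascI (n - m) m).map (fun t => m :: t) ++ ascI n (m + 1) := by
  have hn1 : 1 ≤ n := le_trans hm hmn
  show ascB (n.toNat + 1) n m = _
  rw [ascB_split n.toNat n m (by omega) hmn]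
  congr 2
  · exact ascB_irrel n.toNat ((n - m).toNat + 1) (n - m) m hm (by omega) (by omega) (by omega)

lemma ascI_single (n m : Int) (hm : 1 ≤ m) (hmn : m ≤ n) (h2 : n < 2 * m) :
    ascI n m = [[n]] := by
  have aux : ∀ (k : Nat) (n m : Int), (n - m).toNat = k → 1 ≤ m → m ≤ n → n < 2 * m →
      ascI n m = [[n]] := by
    intro k
    induction k with
    | zero =>
        intro n m hk hm hmn h2
        have hnm : n = m := by omega
        rw [ascI_step n m hm hmn]
        have h1 : ascI (n - m) m = [[]] := by
          rw [hnm]; simp [ascI, ascB]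
        have h3 : ascI n (m + 1) = [] :=
          ascB_nil_of_lt _ n (m + 1) (by omega) (by omega)
        rw [h1, h3]; simp [hnm]
    | succ k ih =>
        intro n m hk hm hmn h2
        have hlt : m < n := by omega
        rw [ascI_step n m hm hmn]
        have h1 : ascI (n - m) m = [] :=
          ascB_nil_of_lt _ (n - m) m (by omega) (by omega)
        have h3 : ascI n (m + 1) = [[n]] :=
          ih n (m + 1) (by omega) (by omega) (by omega) (by omega)
        rw [h1, h3]; simp
  exact aux (n - m).toNat n m rfl hm hmn h2

lemma ascI_twoPart (x y : Int) (hx : 1 ≤ x) (hy : 0 ≤ y) (h : y < 2 * x) :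
    ascI (x + y) x = twoPart x y ++ [[x + y]] := by
  have aux : ∀ (k : Nat) (x y : Int), y.toNat = k → 1 ≤ x → 0 ≤ y → y < 2 * x →
      ascI (x + y) x = twoPart x y ++ [[x + y]] := by
    intro k
    induction k with
    | zero =>
        intro x y hk hx hy h
        have hy0 : y = 0 := by omega
        subst hy0
        rw [twoPart, if_neg (by omega : ¬ x ≤ (0:Int))]
        have := ascI_single (x + 0) x hx (by omega) (by omega)
        rw [this]; simp
    | succ k ih =>
        intro x y hk hx hy h
        by_cases hxy : x ≤ y
        · rw [twoPart, if_pos hxy]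
          rw [ascI_step (x + y) x hx (by omega)]
          have e1 : x + y - x = y := by ring
          rw [e1, ascI_single y x hx hxy h]
          have e2 : x + y = (x + 1) + (y - 1) := by ring
          rw [e2, ih (x + 1) (y - 1) (by omega) (by omega) (by omega) (by omega)]
          simp
        · rw [twoPart, if_neg hxy]
          rw [ascI_single (x + y) x hx (by omega) (by omega)]
          simp
  exact aux y.toNat x y rfl hx hy h

lemma ascB_len (f : Nat) : ∀ (n m : Int), 1 ≤ m →
    (ascB f n m).length ≤ 2 ^ (n + 1 - m).toNat := by
  induction f with
  | zero => intro n m hm; simp [ascB]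
  | succ f ihf =>
      have aux : ∀ (k : Nat) (n m : Int), (n + 1 - m).toNat ≤ k → 1 ≤ m →
          (ascB (f + 1) n m).length ≤ 2 ^ (n + 1 - m).toNat := by
        intro k
        induction k with
        | zero =>
            intro n m hk hm
            by_cases h0 : n = 0
            · subst h0; simp [ascB, Nat.one_le_two_pow]
            · rw [ascB_nil_of_lt (f + 1) n m h0 (by omega)]
              simp
        | succ k ihk =>
            intro n m hk hm
            by_cases h0 : n = 0
            · subst h0; simp [ascB, Nat.one_le_two_pow]
            by_cases hmn : m ≤ n
            · rw [ascB_split f n m h0 hmn]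
              rw [List.length_append, List.length_map]
              have b1 : (ascB f (n - m) m).length ≤ 2 ^ (n - m + 1 - m).toNat := ihf (n - m) m hm
              have b2 : (ascB (f + 1) n (m + 1)).length ≤ 2 ^ (n + 1 - (m + 1)).toNat :=
                ihk n (m + 1) (by omega) (by omega)
              have e1 : (n - m + 1 - m).toNat ≤ (n + 1 - m).toNat - 1 := by omega
              have e2 : (n + 1 - (m + 1)).toNat ≤ (n + 1 - m).toNat - 1 := by omega
              have hd : 1 ≤ (n + 1 - m).toNat := by omega
              calc (ascB f (n - m) m).length + (ascB (f + 1) n (m + 1)).length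
                  ≤ 2 ^ ((n + 1 - m).toNat - 1) + 2 ^ ((n + 1 - m).toNat - 1) := by
                    exact Nat.add_le_add (le_trans b1 (Nat.pow_le_pow_right (by omega) e1))
                      (le_trans b2 (Nat.pow_le_pow_right (by omega) e2))
                _ ≤ 2 ^ (n + 1 - m).toNat := by
                    rw [← two_mul, ← pow_succ']
                    exact Nat.pow_le_pow_right (by omega) (by omega)
            · rw [ascB_nil_of_lt (f + 1) n m h0 (by omega)]
              simp
      exact fun n m hm => aux (n + 1 - m).toNat n m le_rfl hm

lemma len_le_sum (l : List Int) (h : ∀ v ∈ l, 1 ≤ v) : (l.length : Int) ≤ l.sum := by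
  induction l with
  | nil => simp
  | cons a t ih =>
      have ha := h a (by simp)
      have := ih (fun v hv => h v (by simp [hv]))
      simp only [List.length_cons, List.sum_cons]
      push_cast
      omega

lemma take_set_succ (a s : List Int) (k : Nat) (v : Int) (h : k < a.length)
    (ht : a.take k = s) : (a.set k v).take (k + 1) = s ++ [v] := by
  have hk : (a.set k v)[k]? = some v := by
    rw [List.getElem?_set_self']
    simp [List.getElem?_eq_getElem h]
  rw [List.take_add_one, hk, List.take_set_of_le (by omega), ht]
  rfl

lemma specHead_chain (t : Nat) : ∀ (s' : List Int) (x y : Int), 1 ≤ x → 0 ≤ y →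
    (∀ j : Nat, j < t → 2 * x ≤ y - (j : Int) * x) →
    (ascI (x + y) x).map (fun q => s' ++ q) ++ specHead s'.reverse (x + y - 1)
      = (ascI (x + (y - (t : Int) * x)) x).map (fun q => (s' ++ List.replicate t x) ++ q)
        ++ specHead (s' ++ List.replicate t x).reverse (x + (y - (t : Int) * x) - 1) := by
  induction t with
  | zero => intro s' x y hx hy hp; simp
  | succ t ih =>
      intro s' x y hx hy hp
      have h0 : 2 * x ≤ y := by
        have := hp 0 (by omega)
        simpa using this
      have hstep :
          (ascI (x + y) x).map (fun q => s' ++ q) ++ specHead s'.reverse (x + y - 1)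
            = (ascI (x + (y - x)) x).map (fun q => (s' ++ [x]) ++ q)
              ++ specHead (s' ++ [x]).reverse (x + (y - x) - 1) := by
        have e2 : x + (y - x) = y := by ring
        rw [e2, ascI_step (x + y) x hx (by omega)]
        have e1 : x + y - x = y := by ring
        rw [e1]
        have er : (s' ++ [x]).reverse = x :: s'.reverse := by simp
        rw [er, specHead]
        have e3 : x + 1 + (y - 1) = x + y := by ring
        have e4 : x + (y - 1) = x + y - 1 := by ring
        rw [e3, e4, List.reverse_reverse]
        simp only [List.map_append, List.map_map, List.append_assoc]
        congr 1
      rw [hstep]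
      have hps : ∀ j : Nat, j < t → 2 * x ≤ (y - x) - (j : Int) * x := by
        intro j hj
        have h := hp (j + 1) (by omega)
        have e : (y - x) - (j : Int) * x = y - ((j : Int) + 1) * x := by ring
        rw [e]
        exact_mod_cast h
      rw [ih (s' ++ [x]) x (y - x) hx (by omega) hps]
      have el : (s' ++ [x]) ++ List.replicate t x = s' ++ List.replicate (t + 1) x := by
        simp [List.replicate_succ]
      have ey : x + (y - x - (t : Int) * x) = x + (y - ((t : Nat) + 1 : Int) * x) := by
        ring
      rw [el, ey]
      have ey2 : ((t : Nat) + 1 : Int) = ((t + 1 : Nat) : Int) := by push_cast; ring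
      rw [ey2]

lemma pwPhase1_spec (fy : Nat) : ∀ (a s' : List Int) (x y n : Int),
    a.take s'.length = s' → a.length = n.toNat + 1 → (∀ v ∈ s', 1 ≤ v) →
    s'.sum + x + y = n → 1 ≤ x → 0 ≤ y → y.toNat < fy →
    ∃ (t : Nat) (a' : List Int),
      pwPhase1 fy a s'.length x y = (a', s'.length + t, y - (t : Int) * x) ∧
      a'.take (s'.length + t) = s' ++ List.replicate t x ∧
      a'.length = a.length ∧
      ¬ 2 * x ≤ y - (t : Int) * x ∧
      (∀ j : Nat, j < t → 2 * x ≤ y - (j : Int) * x) := by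
  induction fy with
  | zero => intro a s' x y n _ _ _ _ _ hy hfy; omega
  | succ f ih =>
      intro a s' x y n hta hlen hpos hsum hx hy hfy
      by_cases h2 : 2 * x ≤ y
      · have hls : (s'.length : Int) ≤ s'.sum := len_le_sum s' hpos
        have hklen : s'.length < a.length := by omega
        have hset : (a.set s'.length x).take (s'.length + 1) = s' ++ [x] :=
          take_set_succ a s' _ x hklen hta
        have hlen1 : (s' ++ [x]).length = s'.length + 1 := by simp
        obtain ⟨t, a', heq, hta', hlen', hstop, hpush⟩ :=
          ih (a.set s'.length x) (s' ++ [x]) x (y - x) n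
            (by rw [hlen1]; exact hset)
            (by simpa using hlen)
            (by intro v hv; rcases List.mem_append.1 hv with h | h
                exacts [hpos v h, by simpa using (by simpa using h : v = x) ▸ hx])
            (by rw [List.sum_append]; simp; linarith)
            hx (by omega) (by omega)
        refine ⟨t + 1, a', ?_, ?_, ?_, ?_, ?_⟩
        · show pwPhase1 (f + 1) a s'.length x y = _
          rw [pwPhase1, if_pos h2]
          have e1 : (s' ++ [x]).length + t = s'.length + (t + 1) := by simp; omega
          have e2 : y - x - (t : Int) * x = y - ((t + 1 : Nat) : Int) * x := by
            push_cast
            ring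
          rw [e1, e2, show (s' ++ [x]).length = s'.length + 1 from (by simp)] at heq
          exact heq
        · rw [show s'.length + (t + 1) = (s' ++ [x]).length + t from (by simp; omega)]
          rw [hta']
          simp [List.replicate_succ]
        · simpa using hlen'
        · have e : y - ((t : Nat) + 1 : Int) * x = (y - x) - (t : Int) * x := by ring
          rw [show ((t + 1 : Nat) : Int) = ((t : Nat) : Int) + 1 from (by push_cast; ring), e]
          exact hstop
        · intro j hj
          cases j with
          | zero => simpa using h2
          | succ j =>
              have h := hpush j (by omega)
              have e : y - ((j + 1 : Nat) : Int) * x = (y - x) - (j : Int) * x := by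
                push_cast; ring
              rw [e]
              exact h
      · refine ⟨0, a, ?_, ?_, rfl, ?_, ?_⟩
        · rw [pwPhase1, if_neg h2]; simp
        · simpa using hta
        · simpa using h2
        · intro j hj; omega

lemma pwPhase2_spec (fy : Nat) : ∀ (a s : List Int) (x y n : Int) (ft : List Int)
    (res : List (List Int × Int)),
    a.take s.length = s → a.length = n.toNat + 1 → (∀ v ∈ s, 1 ≤ v) →
    s.sum + x + y = n → 1 ≤ x → 0 ≤ y → y.toNat < fy →
    ∃ (a' : List Int) (x' y' : Int),
      pwPhase2 n ft fy a s.length x y res =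
        (a', x', y', res ++ (twoPart x y).map
          (fun q => (s ++ q, find_partition_ways (s ++ q) n ft))) ∧
      a'.take s.length = s ∧ a'.length = a.length ∧ x' + y' = x + y ∧ ¬ x' ≤ y' := by
  induction fy with
  | zero => intro a s x y n ft res _ _ _ _ _ hy hfy; omega
  | succ f ih =>
      intro a s x y n ft res hta hlen hpos hsum hx hy hfy
      by_cases hxy : x ≤ y
      · have hls : (s.length : Int) ≤ s.sum := len_le_sum s hpos
        have hklen : s.length + 1 < a.length := by omega
        have h1 : (a.set s.length x).take (s.length + 1) = s ++ [x] :=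
          take_set_succ a s _ x (by omega) hta
        have h2 : ((a.set s.length x).set (s.length + 1) y).take (s.length + 2) = s ++ [x, y] := by
          have := take_set_succ (a.set s.length x) (s ++ [x]) (s.length + 1) y
            (by simpa using hklen) h1
          simpa using this
        have h3 : ((a.set s.length x).set (s.length + 1) y).take s.length = s := by
          rw [List.take_set_of_le (by omega), List.take_set_of_le (by omega), hta]
        obtain ⟨a', x', y', heq, hta', hlen', hxy', hstop⟩ :=
          ih ((a.set s.length x).set (s.length + 1) y) s (x + 1) (y - 1) n ft
            (res ++ [(s ++ [x, y], find_partition_ways (s ++ [x, y]) n ft)])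
            h3 (by simpa using hlen) hpos (by linarith) (by omega) (by omega) (by omega)
        refine ⟨a', x', y', ?_, hta', by simpa using hlen', by linarith, hstop⟩
        · show pwPhase2 n ft (f + 1) a s.length x y res = _
          rw [pwPhase2, if_pos hxy]
          simp only [h2]
          rw [heq, show twoPart x y = [x, y] :: twoPart (x + 1) (y - 1) from
            (by rw [twoPart, if_pos hxy])]
          simp [List.append_assoc]
      · refine ⟨a, x, y, ?_, hta, rfl, rfl, hxy⟩
        rw [pwPhase2, if_neg hxy, twoPart, if_neg hxy]
        simp

lemma pwOuter_spec (n : Int) (ft : List Int) (fuel : Nat) :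
    ∀ (a s : List Int) (y : Int) (res : List (List Int × Int)),
    a.take s.length = s → a.length = n.toNat + 1 →
    (∀ v ∈ s.dropLast, 1 ≤ v) → (∀ v ∈ s, 0 ≤ v) →
    0 ≤ y → s.sum + y + 1 = n →
    (specHead s.reverse y).length < fuel →
    pwOuter n ft fuel a s.length y res
      = res ++ (specHead s.reverse y).map (fun q => (q, find_partition_ways q n ft)) := by
  induction fuel with
  | zero => intro a s y res _ _ _ _ _ _ hf; omega
  | succ f ih =>
      intro a s y res hta hlen hd1 hd0 hy hsum hf
      rcases List.eq_nil_or_concat s with rfl | ⟨s', aL, rfl⟩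
      · show pwOuter n ft (f + 1) a 0 y res = _
        rw [pwOuter]
        simp [specHead]
      · simp only [List.concat_eq_append] at hta hd1 hd0 hsum hf ⊢
        have hdl : (s' ++ [aL]).dropLast = s' := by simp
        rw [hdl] at hd1
        have haL0 : 0 ≤ aL := hd0 aL (by simp)
        have hx : 1 ≤ aL + 1 := by omega
        have hkm1 : (s' ++ [aL]).length - 1 = s'.length := by simp
        have hta' : a.take s'.length = s' := by
          have h1 : (a.take (s' ++ [aL]).length).take s'.length = s' := by
            rw [hta]
            exact List.take_left' rfl
          rw [List.take_take] at h1
          have hle : s'.length ≤ (s' ++ [aL]).length := by simp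
          rwa [Nat.min_eq_left hle] at h1
        have hgl : a.getD s'.length 0 = aL := by
          have h1 : a[s'.length]? = some aL := by
            have h2 : (a.take (s' ++ [aL]).length)[s'.length]? = a[s'.length]? := by
              apply List.getElem?_take_of_lt
              simp
            rw [hta] at h2
            rw [← h2]
            simp
          simp [List.getD_eq_getElem?_getD, h1]
        have hsum' : s'.sum + (aL + 1) + y = n := by
          have : (s' ++ [aL]).sum = s'.sum + aL := by simp
          rw [this] at hsum
          linarith
        obtain ⟨t, a1, heq1, hta1, hlen1, hstop1, hpush1⟩ :=
          pwPhase1_spec (y.toNat + 1) a s' (aL + 1) y n hta' hlen hd1 hsum' hx hy (by omega)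
        have hy1 : 0 ≤ y - (t : Int) * (aL + 1) := by
          rcases Nat.eq_zero_or_pos t with ht0 | htp
          · subst ht0; simpa using hy
          · have h := hpush1 (t - 1) (by omega)
            have e : ((t - 1 : Nat) : Int) = (t : Int) - 1 := by
              push_cast [Nat.cast_sub htp]
              ring
            rw [e] at h
            have e2 : y - ((t : Int) - 1) * (aL + 1) = y - (t : Int) * (aL + 1) + (aL + 1) := by
              ring
            rw [e2] at h
            linarith
        have hpos1 : ∀ v ∈ s' ++ List.replicate t (aL + 1), 1 ≤ v := by
          intro v hv
          rcases List.mem_append.1 hv with h | h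
          · exact hd1 v h
          · rw [List.eq_of_mem_replicate h]; omega
        have hsum1 : (s' ++ List.replicate t (aL + 1)).sum + (aL + 1) + (y - (t : Int) * (aL + 1)) = n := by
          have : (s' ++ List.replicate t (aL + 1)).sum = s'.sum + (t : Int) * (aL + 1) := by
            simp [List.sum_replicate]
          rw [this]
          linarith
        have hlen1' : (s' ++ List.replicate t (aL + 1)).length = s'.length + t := by simp
        obtain ⟨a2, x2, y2, heq2, hta2, hlen2, hxysum, hstop2⟩ :=
          pwPhase2_spec ((y - (t : Int) * (aL + 1)).toNat + 1) a1 (s' ++ List.replicate t (aL + 1))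
            (aL + 1) (y - (t : Int) * (aL + 1)) n ft res
            (by rw [hlen1']; exact hta1)
            (by rw [hlen1, hlen]) hpos1 hsum1 hx hy1 (by omega)
        -- abbreviations
        set s₁ := s' ++ List.replicate t (aL + 1) with hs₁
        set y1 := y - (t : Int) * (aL + 1) with hy1d
        have hls1 : (s₁.length : Int) ≤ s₁.sum := len_le_sum s₁ hpos1
        have hsum1' : s₁.sum = n - (aL + 1) - y1 := by linarith
        have hn1 : 1 ≤ n := by
          have : (0 : Int) ≤ s₁.sum := le_trans (by positivity) hls1
          linarith
        have hk1len : s₁.length < a2.length := by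
          have : (s₁.length : Int) ≤ n - 1 := by omega
          have hll : a2.length = n.toNat + 1 := by rw [hlen2, hlen1, hlen]
          omega
        have htake3 : (a2.set s₁.length (x2 + y2)).take (s₁.length + 1) = s₁ ++ [(aL + 1) + y1] := by
          rw [take_set_succ a2 s₁ s₁.length (x2 + y2) hk1len hta2, hxysum]
        have htake3' : (a2.set s₁.length (x2 + y2)).take s₁.length = s₁ := by
          rw [List.take_set_of_le (by omega), hta2]
        -- the spec identity for this iteration
        have hrev : (s' ++ [aL]).reverse = aL :: s'.reverse := by simp
        have hSH : specHead (s' ++ [aL]).reverse y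
            = (twoPart (aL + 1) y1).map (fun q => s₁ ++ q) ++ [s₁ ++ [(aL + 1) + y1]]
              ++ specHead s₁.reverse ((aL + 1) + y1 - 1) := by
          rw [hrev, specHead, List.reverse_reverse]
          have e1 : aL + y = (aL + 1) + y - 1 := by ring
          rw [e1]
          rw [specHead_chain t s' (aL + 1) y hx hy hpush1, ← hy1d, ← hs₁]
          rw [ascI_twoPart (aL + 1) y1 hx hy1 (by omega)]
          simp [List.map_append, List.append_assoc]
        -- run the iteration
        show pwOuter n ft (f + 1) a (s' ++ [aL]).length y res = _
        rw [pwOuter]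
        rw [if_pos (by simp : ¬ (s' ++ [aL]).length = 0)]
        simp only [hkm1, hgl, heq1]
        simp only [show s'.length + t = s₁.length from by rw [hlen1']]
        simp only [heq2]
        simp only [htake3]
        rw [show x2 + y2 - 1 = aL + 1 + y1 - 1 from by rw [hxysum]]
        rw [ih (a2.set s₁.length (x2 + y2)) s₁ ((aL + 1) + y1 - 1) _
          htake3' (by rw [List.length_set]; rw [hlen2, hlen1, hlen])
          (fun v hv => hpos1 v (List.mem_of_mem_dropLast hv))
          (fun v hv => le_trans (by omega) (hpos1 v hv))
          (by omega)
          (by rw [hsum1']; ring)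
          (by rw [hSH] at hf; simp at hf; omega)]
        rw [hSH]
        simp [List.map_append, List.append_assoc, List.map_map]


-- ===== VERDICT (by name: the statement is the Claim_ definition above) =====
theorem partitions_and_ways_spec : Claim_equal_partitions_and_ways := by
  intro tn ft _ hpre
  obtain ⟨h1, _, _⟩ := hpre
  unfold Spec_partitions_and_ways partitions_and_ways partitions_and_ways_alt
  have hspec : specHead ([(0:Int)]).reverse (tn - 1) = ascI tn 1 := by
    simp only [List.reverse_singleton, specHead]
    rw [show (0:Int) + 1 + (tn - 1) = tn from by ring, show (0:Int) + 1 = 1 from by ring]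
    simp
  have hfuel : (specHead ([(0:Int)]).reverse (tn - 1)).length < 2 ^ (tn.toNat + 1) := by
    rw [hspec]
    have hb := ascB_len (tn.toNat + 1) tn 1 le_rfl
    have e : tn + 1 - 1 = tn := by ring
    rw [e] at hb
    exact lt_of_le_of_lt hb (Nat.pow_lt_pow_right one_lt_two (by omega))
  have hmain := pwOuter_spec tn ft (2 ^ (tn.toNat + 1)) (List.replicate (tn + 1).toNat 0)
      [0] (tn - 1) []
      (by rw [show ([(0:Int)]).length = 1 from rfl, List.take_replicate,
            show min 1 (tn + 1).toNat = 1 from by omega]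
          rfl)
      (by simp; omega)
      (by simp)
      (by intro v hv; simp at hv; omega)
      (by omega)
      (by simp)
      hfuel
  rw [show ([(0:Int)]).length = 1 from rfl] at hmain
  rw [hmain, hspec]
  rw [if_neg (by omega : ¬ tn < 1)]
  simp [ascI]
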